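-- pv_equiv track=rewrite | github.com/lmp-decaderan/Evolutionary-Strategies | result_combine.py | process_q
-- ===== SOURCE A (Python) =====
-- def process_q(line,q_count):
--     if (q_count == 1):
--         line = line.replace('"', '”')
--     elif (q_count > 1):
--         q_count = 1
--         for w in line:
--             if (w == '"' and q_count % 2 != 0):
--                 line = line.replace('"', '“')
--                 q_count += 1
--             elif (w == '"' and q_count % 2 == 0):
--                 line = line.replace('"', '”')
--                 q_count += 1
--     return line
-- ===== SOURCE B (Python) =====
-- def process_q(line, q_count):
--     if q_count == 1:
--         return line.replace('"', '\u201d')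
--     elif q_count > 1:
--         return line.replace('"', '\u201c')
--     else:
--         return line
-- ===== Notes on version B (the rewrite author's own statement) =====
-- stated objective: simpler
-- what changed: The q_count>1 loop in A is collapsed: its first quote already replaces every '"' with '“' and all later iterations are no-ops, so B is three branchy replace calls with no loop.
import Mathlib
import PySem

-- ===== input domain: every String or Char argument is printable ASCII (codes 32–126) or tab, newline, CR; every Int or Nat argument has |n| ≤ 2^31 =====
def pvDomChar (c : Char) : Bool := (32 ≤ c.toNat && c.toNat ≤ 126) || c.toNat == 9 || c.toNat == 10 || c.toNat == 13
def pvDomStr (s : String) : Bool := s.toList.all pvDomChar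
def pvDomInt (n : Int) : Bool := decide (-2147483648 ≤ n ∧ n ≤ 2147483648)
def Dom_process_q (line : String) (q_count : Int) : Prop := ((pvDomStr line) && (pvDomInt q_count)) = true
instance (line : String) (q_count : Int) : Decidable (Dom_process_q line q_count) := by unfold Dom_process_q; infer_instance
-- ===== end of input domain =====

-- B collapses A's q_count>1 loop (whose first quote already replaces every '"' and whose
-- later iterations are no-ops) into a single replace; same value everywhere.

-- ===== PORT A =====
def process_q (line : String) (q_count : Int) : String :=
  if q_count == 1 then PySem.Str.replace line "\"" "”"
  else if q_count > 1 then
    -- `for w in line` iterates over the ORIGINAL string; line and q_count are the loop state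
    (line.toList.foldl (fun (st : String × Int) w =>
      if w == '"' && st.2 % 2 != 0 then (PySem.Str.replace st.1 "\"" "“", st.2 + 1)
      else if w == '"' && st.2 % 2 == 0 then (PySem.Str.replace st.1 "\"" "”", st.2 + 1)
      else st) (line, (1 : Int))).1
  else line

-- ===== PORT B =====
def process_q_alt (line : String) (q_count : Int) : String :=
  if q_count == 1 then PySem.Str.replace line "\"" "”"
  else if q_count > 1 then PySem.Str.replace line "\"" "“"
  else line

-- ===== PRECONDITION & SPEC =====
def Spec_process_q (line : String) (q_count : Int) (out : String) : Prop := out = process_q_alt line q_count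
instance (line : String) (q_count : Int) (out : String) : Decidable (Spec_process_q line q_count out) := by unfold Spec_process_q; infer_instance

-- ===== CLAIM (what is proved, stated in full; the proofs are below) =====
def Claim_equal_process_q : Prop := ∀ (line : String) (q_count : Int), Dom_process_q line q_count → Spec_process_q line q_count (process_q line q_count)

-- ===== LEMMAS AND PROOFS =====

-- characterisation of replace for a single-char pattern
theorem replace_go_single (q : Char) (new : List Char) :
    ∀ (fuel : Nat) (s acc : List Char), s.length ≤ fuel →
      PySem.Chars.replace.go [q] new fuel s acc
        = acc.reverse ++ s.flatMap (fun c => if c = q then new else [c]) := by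
  intro fuel
  induction fuel with
  | zero =>
    intro s acc h
    cases s with
    | nil => simp [PySem.Chars.replace.go]
    | cons c t => simp at h
  | succ n ih =>
    intro s acc h
    cases s with
    | nil => simp [PySem.Chars.replace.go]
    | cons c t =>
      simp only [PySem.Chars.replace.go]
      by_cases hc : q = c
      · subst hc
        have hp : List.isPrefixOf [q] (q :: t) = true := by
          simp [List.isPrefixOf]
        simp only [hp, if_true, List.length_nil, List.length_cons, Nat.zero_add,
          List.drop_succ_cons, List.drop_zero]
        rw [ih t (new.reverse ++ acc) (by simp at h; omega)]
        simp
      · have hp : List.isPrefixOf [q] (c :: t) = false := by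
          simp only [List.isPrefixOf, Bool.and_eq_false_iff, beq_eq_false_iff_ne, ne_eq]
          exact Or.inl hc
        simp only [hp, Bool.false_eq_true, if_false]
        rw [ih t (c :: acc) (by simp at h ⊢; omega)]
        have : ¬ (c = q) := fun h => hc h.symm
        simp [this]

theorem replace_single (q : Char) (s new : List Char) :
    PySem.Chars.replace s [q] new = s.flatMap (fun c => if c = q then new else [c]) := by
  simp only [PySem.Chars.replace, List.isEmpty_cons, Bool.false_eq_true, if_false]
  simpa using replace_go_single q new s.length s [] (le_refl _)

theorem flatMap_id_of (s : List Char) (f : Char → List Char)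
    (h : ∀ c ∈ s, f c = [c]) : s.flatMap f = s := by
  induction s with
  | nil => rfl
  | cons c t ih =>
    rw [List.flatMap_cons, h c (List.mem_cons_self), ih fun d hd => h d (List.mem_cons_of_mem _ hd)]
    rfl

-- replacing in a string that contains no quote is the identity
theorem replace_noquote (s : String) (new : String)
    (h : ¬ ('"' ∈ s.toList)) : PySem.Str.replace s "\"" new = s := by
  have hr : PySem.Chars.replace s.toList ['"'] new.toList = s.toList := by
    rw [replace_single]
    exact flatMap_id_of _ _ fun c hc => by
      have : c ≠ '"' := fun he => h (he ▸ hc)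
      simp [this]
  have h2 : PySem.Str.replace s "\"" new = String.ofList s.toList := by
    simp only [PySem.Str.replace]
    congr 1
  simpa using h2

-- the result of replacing '"' by a quote-free replacement contains no '"'
theorem noquote_after_replace (s new : List Char) (hn : ¬ ('"' ∈ new)) :
    ¬ ('"' ∈ PySem.Chars.replace s ['"'] new) := by
  rw [replace_single]
  intro h
  rcases List.mem_flatMap.1 h with ⟨c, _, hc⟩
  by_cases hcq : c = '"'
  · simp [hcq] at hc; exact hn hc
  · simp [hcq] at hc; exact hcq hc.symm

-- the loop body of A's q_count>1 branch
def stepA (st : String × Int) (w : Char) : String × Int :=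
  if w == '"' && st.2 % 2 != 0 then (PySem.Str.replace st.1 "\"" "“", st.2 + 1)
  else if w == '"' && st.2 % 2 == 0 then (PySem.Str.replace st.1 "\"" "”", st.2 + 1)
  else st

theorem repL_noquote (s : String) : ¬ ('"' ∈ (PySem.Str.replace s "\"" "“").toList) := by
  rw [PySem.Str.toList_replace]
  exact noquote_after_replace s.toList "“".toList (by decide)

-- once the line has no '"', every further iteration leaves it unchanged
theorem foldl_stepA_noquote (cs : List Char) :
    ∀ (s : String) (k : Int), ¬ ('"' ∈ s.toList) →
      (cs.foldl stepA (s, k)).1 = s := by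
  induction cs with
  | nil => intro s k _; rfl
  | cons c t ih =>
    intro s k hs
    have h1 : PySem.Str.replace s "\"" "“" = s := replace_noquote s _ hs
    have h2 : PySem.Str.replace s "\"" "”" = s := replace_noquote s _ hs
    simp only [List.foldl_cons, stepA]
    split_ifs with hA hB
    · rw [h1]; exact ih s (k+1) hs
    · rw [h2]; exact ih s (k+1) hs
    · exact ih s k hs

-- the loop counter never decreases
theorem foldl_stepA_mono (cs : List Char) :
    ∀ (st : String × Int), st.2 ≤ (cs.foldl stepA st).2 := by
  induction cs with
  | nil => intro st; exact le_refl _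
  | cons c t ih =>
    intro st
    have h1 : st.2 ≤ (stepA st c).2 := by
      unfold stepA
      split_ifs <;> simp
    exact le_trans h1 (ih (stepA st c))

-- the whole loop computes replace '"'→'“' of the original line
theorem foldl_stepA_main (cs : List Char) :
    ∀ (line : String),
      cs.foldl stepA (line, 1) = (line, 1) ∨
      (cs.foldl stepA (line, 1)).1 = PySem.Str.replace line "\"" "“" := by
  induction cs with
  | nil => intro line; exact Or.inl rfl
  | cons c t ih =>
    intro line
    by_cases hc : c = '"'
    · subst hc
      right
      have hstep : stepA (line, 1) '"' = (PySem.Str.replace line "\"" "“", 2) := by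
        simp [stepA]
      simp only [List.foldl_cons, hstep]
      exact foldl_stepA_noquote t _ 2 (repL_noquote line)
    · have hstep : stepA (line, 1) c = (line, 1) := by
        simp [stepA, hc]
      simp only [List.foldl_cons, hstep]
      exact ih line

theorem loop_eq_replace (line : String) :
    (line.toList.foldl stepA (line, 1)).1 = PySem.Str.replace line "\"" "“" := by
  rcases foldl_stepA_main line.toList line with h | h
  · rw [h]
    -- the loop came back with counter 1, so line contains no '"' (the counter never
    -- decreases and any '"' bumps it to ≥ 2); then replace is the identity
    by_cases hq : '"' ∈ line.toList
    · exfalso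
      rcases List.append_of_mem hq with ⟨l1, l2, hsplit⟩
      have hone : (line.toList.foldl stepA (line, 1)).2 = 1 := by rw [h]
      rw [hsplit, List.foldl_append, List.foldl_cons] at hone
      set st := l1.foldl stepA (line, 1) with hst
      have hk : (1 : Int) ≤ st.2 := foldl_stepA_mono l1 (line, 1)
      have hbump : 2 ≤ (stepA st '"').2 := by
        unfold stepA
        split_ifs with h1 h2
        · simp; omega
        · simp; omega
        · exfalso; simp at h1 h2; omega
      have hfin : (stepA st '"').2 ≤ (l2.foldl stepA (stepA st '"')).2 :=
        foldl_stepA_mono l2 (stepA st '"')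
      omega
    · exact (replace_noquote line _ hq).symm
  · exact h

-- ===== VERDICT (by name: the statement is the Claim_ definition above) =====
theorem process_q_spec : Claim_equal_process_q := by
  intro line q_count _
  unfold Spec_process_q process_q process_q_alt
  by_cases h1 : q_count == 1
  · simp [h1]
  · by_cases h2 : q_count > 1
    · simp only [h1, Bool.false_eq_true, if_false, if_pos h2]
      exact loop_eq_replace line
    · simp [h1, h2]
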